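-- pv_equiv track=rewrite | github.com/Sloosi/SignalFilter | desHomutov/main.py | validate_key_parity
-- ===== SOURCE A (Python) =====
-- from typing import List
--
-- def validate_key_parity(key64bit: List[bool]) -> bool:
--     if len(key64bit) != 64:
--         return False
--     for i in range(8):
--         parity_index = i * 8 + 7
--         ones = 0
--         for j in range(7):
--             if key64bit[i * 8 + j]:
--                 ones += 1
--         expected_parity = (ones % 2) == 1
--         if key64bit[parity_index] != expected_parity:
--             return False
--     return True
-- ===== SOURCE B (Python) =====
-- from typing import List
--
-- def validate_key_parity(key64bit: List[bool]) -> bool: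
--     if len(key64bit) != 64:
--         return False
--     rest = key64bit
--     while rest:
--         b0, b1, b2, b3, b4, b5, b6, b7, *rest = rest
--         if b0 ^ b1 ^ b2 ^ b3 ^ b4 ^ b5 ^ b6 ^ b7:
--             return False
--     return True
-- ===== Notes on version B (the rewrite author's own statement) =====
-- stated objective: simpler
-- what changed: Replaces A's indexed nested loops with a ones counter and separate parity-bit comparison by consuming the list destructively eight bits at a time and XOR-folding each byte: a byte is valid iff the XOR of its eight bits is False, with no indices, slices or counters.
import Mathlib
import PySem

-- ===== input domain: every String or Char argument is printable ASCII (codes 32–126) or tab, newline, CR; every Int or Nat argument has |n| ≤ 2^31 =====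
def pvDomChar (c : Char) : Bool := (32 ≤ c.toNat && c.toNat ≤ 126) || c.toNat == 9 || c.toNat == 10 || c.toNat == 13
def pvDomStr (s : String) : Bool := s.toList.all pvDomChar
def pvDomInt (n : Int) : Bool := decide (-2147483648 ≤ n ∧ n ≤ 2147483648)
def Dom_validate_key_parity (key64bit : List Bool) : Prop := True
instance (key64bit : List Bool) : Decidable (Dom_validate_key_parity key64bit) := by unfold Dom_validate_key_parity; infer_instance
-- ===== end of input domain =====

-- B replaces A's indexed nested loops (ones counter + parity-bit comparison) by consuming the
-- list eight bits at a time and XOR-folding each byte (objective: simpler).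

-- ===== PORT A =====
def validate_key_parity (key64bit : List Bool) : Bool :=
  if key64bit.length ≠ 64 then false
  else
    (PySem.List.pyRange 0 8 1).foldl (fun ok i =>
      ok &&
        (let ones : Int := (PySem.List.pyRange 0 7 1).foldl
            (fun o j => if PySem.List.pyGetD key64bit (i * 8 + j) false then o + 1 else o) 0
         let expected : Bool := PySem.Int.mod ones 2 == 1
         PySem.List.pyGetD key64bit (i * 8 + 7) false == expected)) true

-- ===== PORT B =====
-- the while loop of Source B: unpack eight bits, reject if their XOR is set, continue on the tail.
-- The final catch-all arm (1–7 leftover bits) is unreachable under the length-64 guard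
-- (Python's starred unpacking would raise there); it returns false.
def pvChunks8 : List Bool → Bool
  | [] => true
  | b0 :: b1 :: b2 :: b3 :: b4 :: b5 :: b6 :: b7 :: rest =>
      if (((((((b0 != b1) != b2) != b3) != b4) != b5) != b6) != b7) then false
      else pvChunks8 rest
  | _ => false

def validate_key_parity_alt (key64bit : List Bool) : Bool :=
  if key64bit.length ≠ 64 then false
  else pvChunks8 key64bit

-- ===== PRECONDITION & SPEC =====
def Spec_validate_key_parity (key64bit : List Bool) (out : Bool) : Prop := out = validate_key_parity_alt key64bit
instance (key64bit : List Bool) (out : Bool) : Decidable (Spec_validate_key_parity key64bit out) := by unfold Spec_validate_key_parity; infer_instance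

-- ===== CLAIM (what is proved, stated in full; the proofs are below) =====
def Claim_equal_validate_key_parity : Prop := ∀ (key64bit : List Bool), Dom_validate_key_parity key64bit → Spec_validate_key_parity key64bit (validate_key_parity key64bit)

-- ===== LEMMAS AND PROOFS =====

-- A's per-byte check, as a predicate on the byte index
def pvByteChk (key : List Bool) (i : Int) : Bool :=
  let ones : Int := (PySem.List.pyRange 0 7 1).foldl
      (fun o j => if PySem.List.pyGetD key (i * 8 + j) false then o + 1 else o) 0
  PySem.List.pyGetD key (i * 8 + 7) false == (PySem.Int.mod ones 2 == 1)

theorem foldl_and_eq_all {α : Type} (f : α → Bool) (l : List α) (b : Bool) :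
    l.foldl (fun ok i => ok && f i) b = (b && l.all f) := by
  induction l generalizing b with
  | nil => simp
  | cons x xs ih => rw [List.foldl_cons, ih, List.all_cons, Bool.and_assoc]

theorem list_len8 {α : Type} (l : List α) (h : l.length = 8) :
    ∃ a b c d e f g h', l = [a, b, c, d, e, f, g, h'] := by
  rcases l with _|⟨a,_|⟨b,_|⟨c,_|⟨d,_|⟨e,_|⟨f,_|⟨g,_|⟨h',tl⟩⟩⟩⟩⟩⟩⟩⟩ <;> simp_all

-- A's check of byte n equals the XOR test on the byte's eight destructured bits
theorem byteChk_eq_xor (key : List Bool) (n : ℕ)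
    (c0 c1 c2 c3 c4 c5 c6 c7 : Bool) (rest : List Bool)
    (hl : key.drop (n * 8) = c0 :: c1 :: c2 :: c3 :: c4 :: c5 :: c6 :: c7 :: rest) :
    pvByteChk key (n : Int)
      = !(((((((c0 != c1) != c2) != c3) != c4) != c5) != c6) != c7) := by
  have hg : ∀ j : ℕ, j < 8 →
      PySem.List.pyGetD key ((n : Int) * 8 + (j : Int)) false
        = [c0, c1, c2, c3, c4, c5, c6, c7].getD j false := by
    intro j hj
    have : ((n : Int) * 8 + (j : Int)) = ((n * 8 + j : ℕ) : Int) := by push_cast; ring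
    rw [this, PySem.List.pyGetD_natCast]
    have h8 : key.getD (n * 8 + j) false = (key.drop (n * 8)).getD j false := by
      simp [List.getD, List.getElem?_drop]
    rw [h8, hl]
    interval_cases j <;> rfl
  unfold pvByteChk
  have hr7 : PySem.List.pyRange 0 7 1 = [0, 1, 2, 3, 4, 5, 6] := by decide
  rw [hr7]
  simp only [List.foldl]
  rw [show ((n:Int)*8+7) = ((n:Int)*8+((7:ℕ):Int)) by norm_num, hg 7 (by omega),
      show ((n:Int)*8+6) = ((n:Int)*8+((6:ℕ):Int)) by norm_num, hg 6 (by omega),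
      show ((n:Int)*8+5) = ((n:Int)*8+((5:ℕ):Int)) by norm_num, hg 5 (by omega),
      show ((n:Int)*8+4) = ((n:Int)*8+((4:ℕ):Int)) by norm_num, hg 4 (by omega),
      show ((n:Int)*8+3) = ((n:Int)*8+((3:ℕ):Int)) by norm_num, hg 3 (by omega),
      show ((n:Int)*8+2) = ((n:Int)*8+((2:ℕ):Int)) by norm_num, hg 2 (by omega),
      show ((n:Int)*8+1) = ((n:Int)*8+((1:ℕ):Int)) by norm_num, hg 1 (by omega),
      show ((n:Int)*8+0) = ((n:Int)*8+((0:ℕ):Int)) by norm_num, hg 0 (by omega)]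
  clear! key n
  revert c0 c1 c2 c3 c4 c5 c6 c7
  decide

-- A's remaining byte loop (bytes n..7) agrees with B's chunk recursion on the list's tail
theorem aux_chunks (key : List Bool) (hk : key.length = 64) :
    ∀ (m n : ℕ), n + m = 8 →
      (PySem.List.pyRange (n : Int) 8 1).all (pvByteChk key) = pvChunks8 (key.drop (n * 8)) := by
  intro m
  induction m with
  | zero =>
    intro n hn
    have hn8 : n = 8 := by omega
    subst hn8
    rw [PySem.List.pyRange_one_eq_nil (by norm_num),
        List.drop_eq_nil_of_le (by omega : key.length ≤ 8 * 8)]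
    rfl
  | succ m ih =>
    intro n hn
    have hlt : (n : Int) < 8 := by exact_mod_cast (by omega : n < 8)
    have hdlen : (key.drop (n * 8)).length = 64 - n * 8 := by simp [hk]
    have h8 : ((key.drop (n * 8)).take 8).length = 8 := by
      rw [List.length_take, hdlen]; omega
    obtain ⟨c0, c1, c2, c3, c4, c5, c6, c7, htake⟩ := list_len8 _ h8
    have hsplit : key.drop (n * 8)
        = c0 :: c1 :: c2 :: c3 :: c4 :: c5 :: c6 :: c7 :: (key.drop ((n + 1) * 8)) := by
      have h1 : (key.drop (n * 8)).drop 8 = key.drop ((n + 1) * 8) := by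
        rw [List.drop_drop]; congr 1; omega
      conv_lhs => rw [← List.take_append_drop 8 (key.drop (n * 8))]
      rw [htake, h1]
      rfl
    rw [PySem.List.pyRange_one_cons hlt]
    have hcast : ((n : Int) + 1) = ((n + 1 : ℕ) : Int) := by push_cast; ring
    rw [List.all_cons, hcast, ih (n + 1) (by omega),
        byteChk_eq_xor key n c0 c1 c2 c3 c4 c5 c6 c7 _ hsplit, hsplit]
    show _ = pvChunks8 (c0 :: c1 :: c2 :: c3 :: c4 :: c5 :: c6 :: c7 :: key.drop ((n + 1) * 8))
    rw [pvChunks8]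
    cases h : (((((((c0 != c1) != c2) != c3) != c4) != c5) != c6) != c7) <;> simp

theorem vkp_eq (key64bit : List Bool) :
    validate_key_parity key64bit = validate_key_parity_alt key64bit := by
  by_cases h : key64bit.length = 64
  · unfold validate_key_parity validate_key_parity_alt
    rw [if_neg (by simp [h]), if_neg (by simp [h]), foldl_and_eq_all, Bool.true_and]
    have := aux_chunks key64bit h 8 0 (by omega)
    rw [Nat.zero_mul, List.drop_zero] at this
    exact this
  · simp [validate_key_parity, validate_key_parity_alt, h]

-- ===== VERDICT (by name: the statement is the Claim_ definition above) =====
theorem validate_key_parity_spec : Claim_equal_validate_key_parity := by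
  intro key64bit _
  unfold Spec_validate_key_parity
  exact vkp_eq key64bit
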